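/- GENERATED by farm/mkstatement.py from design/units.tsv (unit `calloc`) and the Specs of ProgX/Base/Spec/*.lean — do not edit.
   THE STATEMENT of the proof unit `calloc`: the function `calloc` (25 instructions) satisfies its contract,
   given the contracts of its callees. What the names mean: ProgX/Base/Spec/Basic.lean. The theorem to prove:
   `theorem calloc_ok : ProgX.Base.Spec.calloc.Statement`. -/
import ProgX.Base.Spec.Heap
import ProgX.Base.Spec.Libc
namespace ProgX.Base.Spec.calloc
open X86 X86.User Asan

/-- The statement of unit `calloc`. -/
def Statement : Prop :=
  ∀ (Lay : Layout) (_hLay : Lay.hi = 0x1000000) (μ : Microarch) (_hμ : UserX.MicroOK μ) (u₀ : State)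
    (_hcode : HasCodeNat Lay u₀ ProgX.Base.L.calloc.entry ProgX.Base.Code.code_calloc.nat ProgX.Base.L.calloc.size)
    (_h_heap_product_ok : Calls Lay μ ProgX.Base.WayInv (ProgX.Base.conv u₀) ProgX.Base.L.heap_product_ok.entry ProgX.Base.Spec.heap_product_ok.spec)
    (_h_malloc : ∀ (H : Heap) (rest : List Obj) (frames : List (Nat × FrameLayout)), Calls Lay μ ProgX.Base.WayInv (ProgX.Base.conv u₀) ProgX.Base.L.malloc.entry (ProgX.Base.Spec.malloc.spec H rest frames))
    (_h_memset : ∀ (others : List Obj) (frames : List (Nat × FrameLayout)), Calls Lay μ ProgX.Base.WayInv (ProgX.Base.conv u₀) ProgX.Base.L.memset.entry (ProgX.Base.Spec.memset.spec others frames)),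
    ∀ (H : Heap) (rest : List Obj) (frames : List (Nat × FrameLayout)), Calls Lay μ ProgX.Base.WayInv (ProgX.Base.conv u₀) ProgX.Base.L.calloc.entry (ProgX.Base.Spec.calloc.spec H rest frames)

end ProgX.Base.Spec.calloc
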